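-- pv_equiv track=rewrite | github.com/caferozpinar/FormOlusturma | uygulama/kodlama/kod_uretici.py | _alti_slot_normalize_et
-- ===== SOURCE A (Python) =====
-- from typing import Any
--
-- def _alti_slot_normalize_et(
--     degerler: list[Any] | None,
--     dolgu: str = "-"
-- ) -> list[str]:
--     """
--     Değer listesini 6 slota normalize eder.
--
--     Parametreler:
--     -------------
--     degerler : list[Any] | None
--         Normalize edilecek değerler
--     dolgu : str, optional
--         Boş slotlar için dolgu karakteri (varsayılan: "-")
--
--     Döndürür:
--     ---------
--     list[str]
--         6 elemanlı normalize edilmiş liste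
--     """
--     degerler = degerler or []
--     sonuc = [str(v).strip() for v in degerler]
--
--     # Fazlaysa kes
--     if len(sonuc) > 6:
--         sonuc = sonuc[:6]
--
--     # Eksikse doldur
--     while len(sonuc) < 6:
--         sonuc.append(dolgu)
--
--     # Boş stringleri dolgu yap
--     sonuc = [v if v else dolgu for v in sonuc]
--
--     return sonuc
-- ===== SOURCE B (Python) =====
-- def _alti_slot_normalize_et(degerler, dolgu="-"):
--     degerler = degerler or []
--     sonuc = []
--     for i in range(6):
--         if i < len(degerler):
--             s = str(degerler[i]).strip()
--             sonuc.append(s or dolgu)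
--         else:
--             sonuc.append(dolgu)
--     return sonuc
-- ===== Notes on version B (the rewrite author's own statement) =====
-- stated objective: simpler
-- what changed: One position-driven pass over range(6) computing each slot directly (strip-or-fill per index) instead of A's four phases: comprehension, truncating slice, while-loop padding, and a second empty-fixing comprehension.
import Mathlib
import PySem

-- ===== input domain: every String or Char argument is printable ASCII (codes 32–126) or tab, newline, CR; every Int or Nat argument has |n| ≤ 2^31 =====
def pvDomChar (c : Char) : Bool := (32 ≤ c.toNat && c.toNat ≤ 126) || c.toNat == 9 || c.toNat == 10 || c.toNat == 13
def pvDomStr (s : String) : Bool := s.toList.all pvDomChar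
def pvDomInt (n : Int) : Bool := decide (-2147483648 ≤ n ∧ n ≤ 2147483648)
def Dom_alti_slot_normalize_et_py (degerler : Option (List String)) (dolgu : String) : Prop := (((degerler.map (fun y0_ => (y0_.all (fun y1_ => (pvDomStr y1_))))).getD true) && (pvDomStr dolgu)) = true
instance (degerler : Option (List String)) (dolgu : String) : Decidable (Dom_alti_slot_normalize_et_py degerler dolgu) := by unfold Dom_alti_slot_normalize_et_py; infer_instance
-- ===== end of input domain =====

-- B replaces A's four phases (map, truncating slice, while-pad, empty-fix map) by one
-- position-driven pass over the 6 slots; return-value equivalence only (no mutation observable).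

-- ===== PORT A =====
-- the 'while len(sonuc) < 6: sonuc.append(dolgu)' loop, step for step
def pvPadWhile (sonuc : List String) (dolgu : String) : List String :=
  if sonuc.length < 6 then pvPadWhile (sonuc ++ [dolgu]) dolgu else sonuc
termination_by 6 - sonuc.length
decreasing_by simp_all; omega

def alti_slot_normalize_et_py (degerler : Option (List String)) (dolgu : String) : List String :=
  let degerler := (degerler.getD []);  -- 'degerler or []': None → []; [] → [] (same value)
  let sonuc := degerler.map (fun v => PySem.Str.strip v)
  let sonuc := if sonuc.length > 6 then PySem.List.slice sonuc none (some 6) else sonuc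
  let sonuc := pvPadWhile sonuc dolgu
  sonuc.map (fun v => if v ≠ "" then v else dolgu)

-- ===== PORT B =====
def alti_slot_normalize_et_py_alt (degerler : Option (List String)) (dolgu : String) : List String :=
  let xs := (degerler.getD []);
  (PySem.List.pyRange 0 6 1).foldl (fun sonuc i =>
    if i < (xs.length : Int) then
      let s := PySem.Str.strip (PySem.List.pyGetD xs i "")
      sonuc ++ [if s ≠ "" then s else dolgu]
    else
      sonuc ++ [dolgu]) []

-- ===== PRECONDITION & SPEC =====
def Spec_alti_slot_normalize_et_py (degerler : Option (List String)) (dolgu : String) (out : List String) : Prop := out = alti_slot_normalize_et_py_alt degerler dolgu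
instance (degerler : Option (List String)) (dolgu : String) (out : List String) : Decidable (Spec_alti_slot_normalize_et_py degerler dolgu out) := by unfold Spec_alti_slot_normalize_et_py; infer_instance

-- ===== CLAIM (what is proved, stated in full; the proofs are below) =====
def Claim_equal_alti_slot_normalize_et_py : Prop := ∀ (degerler : Option (List String)) (dolgu : String), Dom_alti_slot_normalize_et_py degerler dolgu → Spec_alti_slot_normalize_et_py degerler dolgu (alti_slot_normalize_et_py degerler dolgu)

-- ===== LEMMAS AND PROOFS =====
-- both sides reduce to a 6-slot literal once the list has a known shape (trail arbitrary for length ≥ 6)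
theorem pv_main (xs : List String) (dolgu : String) :
    alti_slot_normalize_et_py (some xs) dolgu = alti_slot_normalize_et_py_alt (some xs) dolgu := by
  unfold alti_slot_normalize_et_py alti_slot_normalize_et_py_alt
  match xs with
  | [] => simp [pvPadWhile, PySem.List.pyRange, List.range_succ]
  | [a] => simp [pvPadWhile, PySem.List.pyRange, PySem.List.pyGetD, PySem.List.pyGet?, PySem.List.pyIdx?, List.range_succ]
  | [a,b] => simp [pvPadWhile, PySem.List.pyRange, PySem.List.pyGetD, PySem.List.pyGet?, PySem.List.pyIdx?, List.range_succ]
  | [a,b,c] => simp [pvPadWhile, PySem.List.pyRange, PySem.List.pyGetD, PySem.List.pyGet?, PySem.List.pyIdx?, List.range_succ]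
  | [a,b,c,d] => simp [pvPadWhile, PySem.List.pyRange, PySem.List.pyGetD, PySem.List.pyGet?, PySem.List.pyIdx?, List.range_succ]
  | [a,b,c,d,e] => simp [pvPadWhile, PySem.List.pyRange, PySem.List.pyGetD, PySem.List.pyGet?, PySem.List.pyIdx?, List.range_succ]
  | a::b::c::d::e::f::t =>
    cases t with
    | nil =>
      simp [pvPadWhile, PySem.List.pyRange, PySem.List.pyGetD, PySem.List.pyGet?, PySem.List.pyIdx?, List.range_succ]
    | cons g t =>
      have hslice : PySem.List.slice (PySem.Str.strip a :: PySem.Str.strip b :: PySem.Str.strip c ::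
             PySem.Str.strip d :: PySem.Str.strip e :: PySem.Str.strip f :: PySem.Str.strip g ::
             List.map (fun v => PySem.Str.strip v) t) none (some 6)
          = [PySem.Str.strip a, PySem.Str.strip b, PySem.Str.strip c,
             PySem.Str.strip d, PySem.Str.strip e, PySem.Str.strip f] := by
        simp [PySem.List.slice, PySem.List.clampIdx, List.take_succ_cons]
      simp [hslice, pvPadWhile, PySem.List.pyRange, List.range_succ,
        PySem.List.pyGetD, PySem.List.pyGet?, PySem.List.pyIdx?]
      have h6 : ∀ k : Int, k ≤ 6 → k ≤ (t.length : Int) + 1 + 1 + 1 + 1 + 1 + 1 := by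
        intro k hk; omega
      have h5 : ∀ k : Int, k ≤ 5 → k ≤ (t.length : Int) + 1 + 1 + 1 + 1 + 1 := by
        intro k hk; omega
      simp [h6, h5]

-- ===== VERDICT (by name: the statement is the Claim_ definition above) =====
theorem alti_slot_normalize_et_py_spec : Claim_equal_alti_slot_normalize_et_py := by
  intro degerler dolgu _
  unfold Spec_alti_slot_normalize_et_py
  cases degerler with
  | none => exact pv_main [] dolgu ▸ rfl
  | some xs => exact pv_main xs dolgu
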